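-- pv_equiv track=rewrite | github.com/yifan-bao/Deeploy | Deeploy/Tiling/MemoryScheduler.py | _buildInterferenceGraph
-- ===== SOURCE A (Python) =====
-- from typing import Dict, List, Optional, Tuple, Union
--
-- def _buildInterferenceGraph(lifetimeMap):
--
--     def overlap(lifetimeA: Tuple[int, int], lifetimeB: Tuple[int, int]) -> bool:
--         overlap: bool = False
--         overlap |= (lifetimeA[0] >= lifetimeB[0] and lifetimeA[0] <= lifetimeB[1])
--         overlap |= (lifetimeB[0] >= lifetimeA[0] and lifetimeB[0] <= lifetimeA[1])
--
--         return overlap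
--
--     interferenceGraph: Dict[str, List[str]] = {}
--     for name, lifetime in lifetimeMap.items():
--         neighbors: List[str] = []
--         for neighborName, neighborLifetime in lifetimeMap.items():
--             if neighborName == name:
--                 continue
--
--             if overlap(lifetime, neighborLifetime):
--                 neighbors.append(neighborName)
--
--         interferenceGraph[name] = neighbors
--
--     return interferenceGraph
-- ===== SOURCE B (Python) =====
-- def _buildInterferenceGraph(lifetimeMap):
--
--     def overlap(a, b):
--         return b[0] <= a[0] <= b[1] or a[0] <= b[0] <= a[1]
--
--     items = list(lifetimeMap.items())
--     graph = {name: [] for name, _ in items}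
--     for i, (name, lifetime) in enumerate(items):
--         for other, otherLifetime in items[i + 1:]:
--             if overlap(lifetime, otherLifetime):
--                 graph[name].append(other)
--                 graph[other].append(name)
--     return graph
-- ===== Notes on version B (the rewrite author's own statement) =====
-- stated objective: alternative
-- what changed: A rescans the whole map for every entry (every ordered pair tested twice overall); B enumerates each unordered pair exactly once and, on overlap, appends to both adjacency lists at once; Pre_ excludes association lists with duplicate names, which do not represent a Python dict.
import Mathlib
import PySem

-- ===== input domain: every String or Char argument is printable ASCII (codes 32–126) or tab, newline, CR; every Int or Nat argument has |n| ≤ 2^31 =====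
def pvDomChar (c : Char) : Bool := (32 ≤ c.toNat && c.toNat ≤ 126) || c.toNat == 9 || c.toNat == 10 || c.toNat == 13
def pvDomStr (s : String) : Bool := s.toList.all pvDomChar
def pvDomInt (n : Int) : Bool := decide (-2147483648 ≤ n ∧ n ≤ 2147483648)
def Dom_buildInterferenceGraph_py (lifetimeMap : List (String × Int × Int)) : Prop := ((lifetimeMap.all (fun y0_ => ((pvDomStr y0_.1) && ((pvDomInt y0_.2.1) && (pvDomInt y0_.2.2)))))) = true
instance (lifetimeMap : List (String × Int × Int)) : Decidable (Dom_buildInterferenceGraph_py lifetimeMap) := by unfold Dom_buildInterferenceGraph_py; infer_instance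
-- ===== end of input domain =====

-- B tests each unordered pair once and fills both adjacency lists at the same time,
-- instead of A's per-node rescan of the whole map (objective: alternative).

-- ===== PORT A =====
def pyOverlap (a b : Int × Int) : Bool :=
  (decide (a.1 ≥ b.1) && decide (a.1 ≤ b.2)) || (decide (b.1 ≥ a.1) && decide (b.1 ≤ a.2))

def buildInterferenceGraph_py (lifetimeMap : List (String × Int × Int)) : List (String × List String) :=
  (lifetimeMap.foldl (fun (g : PySem.Dict String (List String)) (p : String × Int × Int) =>
      g.insert p.1 (lifetimeMap.foldl (fun (acc : List String) (q : String × Int × Int) =>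
          if q.1 == p.1 then acc
          else if pyOverlap p.2 q.2 then acc ++ [q.1] else acc) [])) PySem.Dict.empty).items

-- ===== PORT B =====
def altOverlap (a b : Int × Int) : Bool :=
  (decide (b.1 ≤ a.1) && decide (a.1 ≤ b.2)) || (decide (a.1 ≤ b.1) && decide (b.1 ≤ a.2))

-- inner loop of Source B: for other, otherLifetime in items[i+1:]: on overlap append both ways
def pairInner (name : String) (lt : Int × Int) (rest : List (String × Int × Int))
    (d : PySem.Dict String (List String)) : PySem.Dict String (List String) :=
  rest.foldl (fun d q =>
    if altOverlap lt q.2 then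
      (d.modify name [] (· ++ [q.1])).modify q.1 [] (· ++ [name])
    else d) d

-- outer loop of Source B: items[i+1:] is the structural tail
def pairLoop : List (String × Int × Int) → PySem.Dict String (List String) → PySem.Dict String (List String)
  | [], d => d
  | (name, lt) :: rest, d => pairLoop rest (pairInner name lt rest d)

def buildInterferenceGraph_py_alt (lifetimeMap : List (String × Int × Int)) : List (String × List String) :=
  (pairLoop lifetimeMap
    (lifetimeMap.foldl (fun (d : PySem.Dict String (List String)) p => d.insert p.1 []) PySem.Dict.empty)).items

-- ===== PRECONDITION & SPEC =====
-- Pre_ excludes association lists with duplicate names, which do not represent a Python dict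
-- (A's parameter is a dict, whose keys are necessarily distinct).
def Pre_buildInterferenceGraph_py (lifetimeMap : List (String × Int × Int)) : Prop :=
  (lifetimeMap.map (·.1)).Nodup
instance (lifetimeMap : List (String × Int × Int)) : Decidable (Pre_buildInterferenceGraph_py lifetimeMap) := by unfold Pre_buildInterferenceGraph_py; infer_instance

def pvWitness_buildInterferenceGraph_py : (List (String × Int × Int)) :=
  [("a", 0, 2), ("b", 1, 3), ("c", 5, 6)]

def Spec_buildInterferenceGraph_py (lifetimeMap : List (String × Int × Int)) (out : List (String × List String)) : Prop := out = buildInterferenceGraph_py_alt lifetimeMap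
instance (lifetimeMap : List (String × Int × Int)) (out : List (String × List String)) : Decidable (Spec_buildInterferenceGraph_py lifetimeMap out) := by unfold Spec_buildInterferenceGraph_py; infer_instance

-- ===== CLAIM (what is proved, stated in full; the proofs are below) =====
def Claim_equal_buildInterferenceGraph_py : Prop := ∀ (lifetimeMap : List (String × Int × Int)), Dom_buildInterferenceGraph_py lifetimeMap → Pre_buildInterferenceGraph_py lifetimeMap → Spec_buildInterferenceGraph_py lifetimeMap (buildInterferenceGraph_py lifetimeMap)

-- ===== LEMMAS AND PROOFS =====

-- the neighbor row A computes for entry p, relative to the whole map L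
def nbrsF (L : List (String × Int × Int)) (p : String × Int × Int) : String × List String :=
  (p.1, (L.filter (fun q => (q.1 != p.1) && pyOverlap p.2 q.2)).map (·.1))

theorem alt_eq_py (a b : Int × Int) : altOverlap a b = pyOverlap a b := by
  simp only [altOverlap, pyOverlap, ge_iff_le]

theorem alt_symm (a b : Int × Int) : altOverlap a b = altOverlap b a := by
  simp only [altOverlap]; rw [Bool.or_comm]

theorem inner_eq (L : List (String × Int × Int)) (p : String × Int × Int) :
    L.foldl (fun (acc : List String) (q : String × Int × Int) =>
        if q.1 == p.1 then acc
        else if pyOverlap p.2 q.2 then acc ++ [q.1] else acc) []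
      = (L.filter (fun q => (q.1 != p.1) && pyOverlap p.2 q.2)).map (·.1) := by
  have hfun : (fun (acc : List String) (q : String × Int × Int) =>
      if q.1 == p.1 then acc
      else if pyOverlap p.2 q.2 then acc ++ [q.1] else acc)
      = (fun (acc : List String) (q : String × Int × Int) =>
      if ((q.1 != p.1) && pyOverlap p.2 q.2) then acc ++ [q.1] else acc) := by
    funext acc q
    rcases h1 : (q.1 == p.1) with _ | _ <;> rcases h2 : pyOverlap p.2 q.2 with _ | _ <;>
      simp_all
  rw [hfun, PySem.List.foldl_append_if]
  simp

theorem portA_eq (L : List (String × Int × Int))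
    (h : (L.map (·.1)).Nodup) : buildInterferenceGraph_py L = L.map (nbrsF L) := by
  unfold buildInterferenceGraph_py
  have hfold := PySem.Dict.items_foldl_insert_fresh (l := L)
    (k := fun p : String × Int × Int => p.1)
    (v := fun p : String × Int × Int => L.foldl (fun (acc : List String) (q : String × Int × Int) =>
        if q.1 == p.1 then acc
        else if pyOverlap p.2 q.2 then acc ++ [q.1] else acc) [])
    (d := PySem.Dict.empty) (fun a _ => PySem.Dict.contains_empty _) h
  rw [hfold]
  simp only [show (PySem.Dict.empty : PySem.Dict String (List String)).items = [] from rfl,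
    List.nil_append]
  apply List.map_congr_left
  intro p _
  rw [inner_eq]
  rfl

-- value lookup after the paired append B performs on an overlap
theorem getD_dm (d : PySem.Dict String (List String)) (n q x u v : String) (h : n ≠ q) :
    ((d.modify n [] (· ++ [u])).modify q [] (· ++ [v])).getD x [] =
      if x = q then d.getD q [] ++ [v]
      else if x = n then d.getD n [] ++ [u]
      else d.getD x [] := by
  rw [PySem.Dict.getD_modify]
  by_cases h1 : x = q
  · rw [if_pos h1, if_pos h1, PySem.Dict.getD_modify_of_ne _ _ _ (Ne.symm h)]
  · rw [if_neg h1, if_neg h1, PySem.Dict.getD_modify]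

-- the one occurrence of name x in a nodup-keyed list
theorem filter_key_single (l : List (String × Int × Int)) (x : String) (lx : Int × Int)
    (P : (String × Int × Int) → Bool)
    (hnd : (l.map (·.1)).Nodup) (hm : (x, lx) ∈ l) :
    l.filter (fun q => q.1 == x && P q) = if P (x, lx) then [(x, lx)] else [] := by
  induction l with
  | nil => cases hm
  | cons p l ih =>
    simp only [List.map_cons, List.nodup_cons] at hnd
    obtain ⟨hp, hnd'⟩ := hnd
    rcases List.mem_cons.mp hm with he | hm'
    · subst he
      have hnone : l.filter (fun q => q.1 == x && P q) = [] := by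
        apply List.filter_eq_nil_iff.mpr
        intro q hq
        have hq1 : q.1 ∈ l.map (·.1) := List.mem_map_of_mem hq
        have : q.1 ≠ x := fun e => hp (e ▸ hq1)
        simp [this]
      rw [List.filter_cons, hnone]
      simp
    · have hx : x ∈ l.map (·.1) := List.mem_map_of_mem (f := (·.1)) hm'
      have hpx : (p.1 == x) = false := by
        have : p.1 ≠ x := fun e => hp (e ▸ hx)
        simp [this]
      rw [List.filter_cons, ih hnd' hm']
      simp [hpx]

theorem getD_pairInner (name : String) (lt : Int × Int) (rest : List (String × Int × Int))
    (d : PySem.Dict String (List String)) (x : String)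
    (hna : name ∉ rest.map (·.1)) :
    (pairInner name lt rest d).getD x [] =
      if x = name then d.getD x [] ++ (rest.filter (fun q => altOverlap lt q.2)).map (·.1)
      else d.getD x [] ++ (rest.filter (fun q => q.1 == x && altOverlap lt q.2)).map (fun _ => name) := by
  induction rest generalizing d with
  | nil => simp [pairInner]
  | cons q rs ih =>
    simp only [List.map_cons, List.mem_cons, not_or] at hna
    obtain ⟨hnq, hnrs⟩ := hna
    by_cases hov : altOverlap lt q.2 = true
    · have hstep : pairInner name lt (q :: rs) d = pairInner name lt rs
          ((d.modify name [] (· ++ [q.1])).modify q.1 [] (· ++ [name])) := by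
        simp [pairInner, hov]
      rw [hstep, ih _ hnrs, getD_dm d name q.1 x q.1 name hnq]
      by_cases hx : x = name
      · have hxq : x ≠ q.1 := fun e => hnq (hx ▸ e)
        simp only [if_pos hx, if_neg hxq]
        rw [List.filter_cons, if_pos hov, List.map_cons, hx, List.append_assoc]
        simp
      · simp only [if_neg hx]
        by_cases hq : x = q.1
        · simp only [if_pos hq]
          rw [List.filter_cons, if_pos (by simp [hov, hq.symm]),
            List.map_cons, hq, List.append_assoc]
          simp
        · have hq1x : (q.1 == x) = false := by
            have : q.1 ≠ x := fun e => hq e.symm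
            simp [this]
          simp only [if_neg hq]
          rw [List.filter_cons, if_neg (by simp [hq1x])]
    · have hov' : altOverlap lt q.2 = false := by
        rcases h : altOverlap lt q.2 with _ | _
        · rfl
        · exact absurd h hov
      have hstep : pairInner name lt (q :: rs) d = pairInner name lt rs d := by
        simp [pairInner, hov']
      have h1 : (q :: rs).filter (fun q => altOverlap lt q.2)
          = rs.filter (fun q => altOverlap lt q.2) := by
        rw [List.filter_cons, if_neg (by simp [hov'])]
      have h2 : (q :: rs).filter (fun p => p.1 == x && altOverlap lt p.2)
          = rs.filter (fun p => p.1 == x && altOverlap lt p.2) := by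
        rw [List.filter_cons, if_neg (by simp [hov'])]
      rw [hstep, ih _ hnrs, h1, h2]

theorem getD_pairLoop_not_mem (rest : List (String × Int × Int))
    (d : PySem.Dict String (List String)) (x : String)
    (hnd : (rest.map (·.1)).Nodup) (hx : x ∉ rest.map (·.1)) :
    (pairLoop rest d).getD x [] = d.getD x [] := by
  induction rest generalizing d with
  | nil => rfl
  | cons p rs ih =>
    obtain ⟨n, lt⟩ := p
    simp only [List.map_cons, List.nodup_cons] at hnd
    simp only [List.map_cons, List.mem_cons, not_or] at hx
    rw [show pairLoop ((n, lt) :: rs) d = pairLoop rs (pairInner n lt rs d) from rfl,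
      ih _ hnd.2 hx.2, getD_pairInner _ _ _ _ _ hnd.1, if_neg hx.1]
    have hnone : rs.filter (fun q => q.1 == x && altOverlap lt q.2) = [] := by
      apply List.filter_eq_nil_iff.mpr
      intro q hq
      have hq1 : q.1 ∈ rs.map (·.1) := List.mem_map_of_mem hq
      have : q.1 ≠ x := fun e => hx.2 (e ▸ hq1)
      simp [this]
    simp [hnone]

theorem getD_pairLoop (rest : List (String × Int × Int))
    (d : PySem.Dict String (List String)) (x : String) (lx : Int × Int)
    (hnd : (rest.map (·.1)).Nodup) (hm : (x, lx) ∈ rest) :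
    (pairLoop rest d).getD x [] =
      d.getD x [] ++ (rest.filter (fun q => (q.1 != x) && altOverlap lx q.2)).map (·.1) := by
  induction rest generalizing d with
  | nil => cases hm
  | cons p rs ih =>
    obtain ⟨n, lt⟩ := p
    simp only [List.map_cons, List.nodup_cons] at hnd
    obtain ⟨hn, hnd'⟩ := hnd
    rw [show pairLoop ((n, lt) :: rs) d = pairLoop rs (pairInner n lt rs d) from rfl]
    rcases List.mem_cons.mp hm with he | hm'
    · injection he with he1 he2
      subst he1; subst he2
      rw [getD_pairLoop_not_mem rs _ x hnd' hn,
        getD_pairInner _ _ _ _ _ hn, if_pos rfl]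
      have hflt : ((x, lx) :: rs).filter (fun q => (q.1 != x) && altOverlap lx q.2)
          = rs.filter (fun q => altOverlap lx q.2) := by
        rw [List.filter_cons, if_neg (by simp)]
        apply List.filter_congr
        intro q hq
        have hq1 : q.1 ∈ rs.map (·.1) := List.mem_map_of_mem hq
        have : q.1 ≠ x := fun e => hn (e ▸ hq1)
        simp [this]
      rw [hflt]
    · have hxrs : x ∈ rs.map (·.1) := List.mem_map_of_mem (f := (·.1)) hm'
      have hxn : x ≠ n := fun e => hn (e ▸ hxrs)
      rw [ih _ hnd' hm', getD_pairInner _ _ _ _ _ hn, if_neg hxn,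
        filter_key_single rs x lx _ hnd' hm', List.filter_cons]
      have hnx : (((n, lt).1 != x) && altOverlap lx (n, lt).2)
          = altOverlap lx lt := by
        simp [Ne.symm hxn]
      rw [hnx, alt_symm lx lt]
      rcases hov : altOverlap lt lx with _ | _
      · simp
      · simp [List.append_assoc]

theorem keys_pairInner (name : String) (lt : Int × Int) (rest : List (String × Int × Int))
    (d : PySem.Dict String (List String))
    (hn : name ∈ d.keys) (hall : ∀ q ∈ rest, q.1 ∈ d.keys) :
    (pairInner name lt rest d).keys = d.keys := by
  induction rest generalizing d with
  | nil => rfl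
  | cons q rs ih =>
    by_cases hov : altOverlap lt q.2 = true
    · have hstep : pairInner name lt (q :: rs) d = pairInner name lt rs
          ((d.modify name [] (· ++ [q.1])).modify q.1 [] (· ++ [name])) := by
        simp [pairInner, hov]
      have hk1 : (d.modify name [] (· ++ [q.1])).keys = d.keys := by
        rw [PySem.Dict.keys_modify, PySem.Dict.keys_insert_of_contains]
        exact (PySem.Dict.contains_iff_mem_keys _ _).mpr hn
      have hk2 : ((d.modify name [] (· ++ [q.1])).modify q.1 [] (· ++ [name])).keys = d.keys := by
        rw [PySem.Dict.keys_modify, PySem.Dict.keys_insert_of_contains, hk1]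
        rw [PySem.Dict.contains_iff_mem_keys, hk1]
        exact hall q List.mem_cons_self
      rw [hstep, ih _ (hk2 ▸ hn) (fun p hp => hk2 ▸ hall p (List.mem_cons_of_mem _ hp)), hk2]
    · have hov' : altOverlap lt q.2 = false := by
        rcases h : altOverlap lt q.2 with _ | _
        · rfl
        · exact absurd h hov
      have hstep : pairInner name lt (q :: rs) d = pairInner name lt rs d := by
        simp [pairInner, hov']
      rw [hstep, ih d hn (fun p hp => hall p (List.mem_cons_of_mem _ hp))]

theorem keys_pairLoop (rest : List (String × Int × Int))
    (d : PySem.Dict String (List String))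
    (hall : ∀ q ∈ rest, q.1 ∈ d.keys) :
    (pairLoop rest d).keys = d.keys := by
  induction rest generalizing d with
  | nil => rfl
  | cons p rs ih =>
    obtain ⟨n, lt⟩ := p
    have hk : (pairInner n lt rs d).keys = d.keys :=
      keys_pairInner n lt rs d (hall _ List.mem_cons_self)
        (fun q hq => hall q (List.mem_cons_of_mem _ hq))
    rw [show pairLoop ((n, lt) :: rs) d = pairLoop rs (pairInner n lt rs d) from rfl,
      ih _ (fun q hq => hk ▸ hall q (List.mem_cons_of_mem _ hq)), hk]

theorem items_eq_keys_map (d : PySem.Dict String (List String)) (h : d.keys.Nodup) :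
    d.items = d.keys.map (fun k => (k, d.getD k [])) := by
  have hmap : d.items = d.items.map (fun p => (p.1, d.getD p.1 [])) := by
    conv_lhs => rw [← List.map_id d.items]
    apply List.map_congr_left
    intro p hp
    have := PySem.Dict.getD_of_mem_items d (k := p.1) (v := p.2) (by simpa using hp) h []
    simp [this]
  rw [hmap, show d.keys = d.items.map (·.1) from rfl, List.map_map]
  rfl

theorem portB_eq (L : List (String × Int × Int))
    (h : (L.map (·.1)).Nodup) : buildInterferenceGraph_py_alt L = L.map (nbrsF L) := by
  unfold buildInterferenceGraph_py_alt
  have hinit := PySem.Dict.items_foldl_insert_fresh (l := L)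
    (k := fun p : String × Int × Int => p.1)
    (v := fun _ : String × Int × Int => ([] : List String))
    (d := PySem.Dict.empty) (fun a _ => PySem.Dict.contains_empty _) h
  set d0 := L.foldl (fun (d : PySem.Dict String (List String)) p => d.insert p.1 []) PySem.Dict.empty with hd0
  have hitems0 : d0.items = L.map (fun p => (p.1, ([] : List String))) := by
    rw [hinit]; rfl
  have hkeys0 : d0.keys = L.map (·.1) := by
    rw [show d0.keys = d0.items.map (·.1) from rfl, hitems0, List.map_map]
    rfl
  have hnd0 : d0.keys.Nodup := hkeys0 ▸ h
  have hget0 : ∀ p ∈ L, d0.getD p.1 [] = [] := by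
    intro p hp
    exact PySem.Dict.getD_of_mem_items d0 (hitems0 ▸ List.mem_map_of_mem hp) hnd0 []
  have hkeys : (pairLoop L d0).keys = d0.keys :=
    keys_pairLoop L d0 (fun q hq => hkeys0 ▸ List.mem_map_of_mem hq)
  rw [items_eq_keys_map _ (hkeys ▸ hnd0), hkeys, hkeys0, List.map_map]
  apply List.map_congr_left
  intro p hp
  have hgd := getD_pairLoop L d0 p.1 p.2 h (by simpa using hp)
  have hfilt : L.filter (fun q => (q.1 != p.1) && altOverlap p.2 q.2)
      = L.filter (fun q => (q.1 != p.1) && pyOverlap p.2 q.2) := by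
    apply List.filter_congr
    intro q _
    rw [alt_eq_py]
  simp only [Function.comp_apply, hgd, hget0 p hp, List.nil_append, nbrsF, hfilt]

-- ===== VERDICT (by name: the statement is the Claim_ definition above) =====
theorem buildInterferenceGraph_py_spec : Claim_equal_buildInterferenceGraph_py := by
  intro L _ hpre
  unfold Spec_buildInterferenceGraph_py
  rw [portA_eq L hpre, portB_eq L hpre]
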